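-- pv_equiv track=rewrite | github.com/askoufis/project-euler | problem24.py | decimalToFactoradic
-- ===== SOURCE A (Python) =====
-- import math
--
-- def decimalToFactoradic(num, n):
--     """
--     Converts a decimal number into a factoradic number
--     Input: The decimal number and the factoradic base n
--     Output: A string representing the decimal number in base factorial
--     """
--
--     # I'd guess that a string uses less space than a list, but who knows with python
--     factoradic = ""
--
--     # Calculate the factoradic "bits" from left to right starting with the (n-1)! bit
--     while n-1 > 1:
--         factoradic += str(num // math.factorial(n-1))
--
--         num = num % math.factorial(n-1)
--
--         n -= 1
--
--     # The second factoradic "bit" determines whether or not the number is odd or even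
--     # I took it out of the loop to avoid for some reason
--     # Who knows
--     factoradic += str(num % 2)
--
--     # The first bit in base factorial will always be 0
--     factoradic += "0"
--
--     return factoradic
-- ===== SOURCE B (Python) =====
-- def decimalToFactoradic(num, n):
--     """
--     Converts a decimal number into a factoradic number
--     Input: The decimal number and the factoradic base n
--     Output: A string representing the decimal number in base factorial
--     """
--     if n <= 2:
--         return str(num % 2) + "0"
--     # Collect the factoradic digits right-to-left by successive division:
--     # the remainder mod i is the i-th digit, no factorial ever computed.
--     rems = []
--     for i in range(2, n):
--         rems.append(num % i)
--         num //= i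
--     # num now holds the leading (n-1)!-digit
--     return str(num) + "".join(str(r) for r in reversed(rems)) + "0"
-- ===== Notes on version B (the rewrite author's own statement) =====
-- stated objective: faster
-- what changed: B extracts the factoradic digits right-to-left by successive division (num % i, num //= i) over i = 2..n-1 and joins them reversed, instead of A's left-to-right division by a freshly computed factorial(n-1) each iteration.
import Mathlib
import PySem

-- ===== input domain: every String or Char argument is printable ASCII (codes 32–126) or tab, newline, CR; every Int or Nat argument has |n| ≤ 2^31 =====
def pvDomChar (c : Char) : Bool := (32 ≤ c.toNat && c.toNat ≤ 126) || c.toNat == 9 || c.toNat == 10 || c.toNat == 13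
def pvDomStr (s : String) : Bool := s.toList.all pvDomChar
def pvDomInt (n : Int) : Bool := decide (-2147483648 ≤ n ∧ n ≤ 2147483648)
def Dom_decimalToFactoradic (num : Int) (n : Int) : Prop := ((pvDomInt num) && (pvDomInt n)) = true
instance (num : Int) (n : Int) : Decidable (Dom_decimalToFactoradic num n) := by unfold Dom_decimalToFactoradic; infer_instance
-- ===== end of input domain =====

-- B computes the factoradic digits right-to-left by successive division (num % i, num //= i),
-- never computing a factorial; A divides by freshly computed factorials left-to-right.

-- ===== PORT A =====

-- math.factorial(k); inside A's loop k = n-1 ≥ 2, where this is exact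
def pvFactI (k : Nat) : Int := (Nat.factorial k : Int)

-- the while-loop of A, carrying the accumulated string `factoradic`
def pvFacLoop (factoradic : String) (num : Int) (n : Int) : String :=
  if n - 1 > 1 then
    pvFacLoop (factoradic ++ PySem.Int.toStr (PySem.Int.floordiv num (pvFactI (n-1).toNat)))
      (PySem.Int.mod num (pvFactI (n-1).toNat)) (n-1)
  else (factoradic ++ PySem.Int.toStr (PySem.Int.mod num 2)) ++ "0"
termination_by n.toNat
decreasing_by omega

def decimalToFactoradic (num : Int) (n : Int) : String := pvFacLoop "" num n

-- ===== PORT B =====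

-- one step of B's for-loop: rems.append(num % i); num //= i
def pvStep (st : Int × List Int) (i : Int) : Int × List Int :=
  (PySem.Int.floordiv st.1 i, st.2 ++ [PySem.Int.mod st.1 i])

def decimalToFactoradic_alt (num : Int) (n : Int) : String :=
  if n ≤ 2 then PySem.Int.toStr (PySem.Int.mod num 2) ++ "0"
  else
    let st := (PySem.List.pyRange 2 n 1).foldl pvStep (num, [])
    PySem.Int.toStr st.1 ++ PySem.Str.join "" (st.2.reverse.map PySem.Int.toStr) ++ "0"

-- ===== PRECONDITION & SPEC =====
def Spec_decimalToFactoradic (num : Int) (n : Int) (out : String) : Prop := out = decimalToFactoradic_alt num n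
instance (num : Int) (n : Int) (out : String) : Decidable (Spec_decimalToFactoradic num n out) := by unfold Spec_decimalToFactoradic; infer_instance

-- ===== CLAIM (what is proved, stated in full; the proofs are below) =====
def Claim_equal_decimalToFactoradic : Prop := ∀ (num : Int) (n : Int), Dom_decimalToFactoradic num n → Spec_decimalToFactoradic num n (decimalToFactoradic num n)

-- ===== LEMMAS AND PROOFS =====

theorem pvFactI_pos (k : Nat) : 0 < pvFactI k := by
  simpa [pvFactI] using Nat.factorial_pos k

theorem pvFactI_succ (k : Nat) : pvFactI k * ((k+1 : Nat) : Int) = pvFactI (k+1) := by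
  simp [pvFactI, Nat.factorial_succ]; ring

theorem pvFloordiv_one (a : Int) : PySem.Int.floordiv a 1 = a := by
  rw [PySem.Int.floordiv_eq_ediv_of_pos one_pos]; exact Int.ediv_one a

-- the list of digits B collects for bases 2..m-1 (least significant first)
def pvDigs (a : Int) : Nat → List Int
  | 0 => []
  | 1 => []
  | 2 => []
  | k+3 => pvDigs a (k+2) ++ [PySem.Int.mod (PySem.Int.floordiv a (pvFactI (k+1))) ((k+2 : Nat) : Int)]

theorem intercalate_nil_flatten {α : Type} (xs : List (List α)) : [].intercalate xs = xs.flatten := by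
  induction xs with
  | nil => rfl
  | cons h t ih => cases t with
    | nil => simp [List.intercalate]
    | cons b c => simp_all [List.intercalate, List.intersperse]

theorem pvJoinCons (s : String) (l : List String) :
    PySem.Str.join "" (s :: l) = s ++ PySem.Str.join "" l := by
  simp [PySem.Str.join, PySem.Chars.join, intercalate_nil_flatten, String.ofList_append]

theorem pvSubMulDiv (a q d : Int) (hd : d ≠ 0) : (a - q*d)/d = a/d - q := by
  rw [sub_eq_add_neg, ← neg_mul, Int.add_mul_ediv_right _ _ hd]; ring

-- (a % (d*c)) // d = (a // d) % c   (Python floor semantics, positive divisors)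
theorem pvDivModEq (a d c : Int) (hd : 0 < d) (hc : 0 < c) :
    PySem.Int.floordiv (PySem.Int.mod a (d*c)) d = PySem.Int.mod (PySem.Int.floordiv a d) c := by
  have hdc : 0 < d*c := mul_pos hd hc
  rw [PySem.Int.mod_eq_emod_of_pos hdc, PySem.Int.floordiv_eq_ediv_of_pos hd,
      PySem.Int.floordiv_eq_ediv_of_pos hd, PySem.Int.mod_eq_emod_of_pos hc]
  rw [Int.emod_def a (d*c), Int.emod_def (a/d) c]
  have h1 : a - d*c*(a/(d*c)) = a - (c*(a/(d*c)))*d := by ring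
  rw [h1, pvSubMulDiv _ _ _ (by omega), ← Int.ediv_ediv_of_nonneg (le_of_lt hd)]

-- ((a % F) // d) % c = (a // d) % c  whenever d*c divides F
theorem pvModDivMod (a F d c : Int) (hF : 0 < F) (hd : 0 < d) (hc : 0 < c) (hdvd : d*c ∣ F) :
    PySem.Int.mod (PySem.Int.floordiv (PySem.Int.mod a F) d) c
      = PySem.Int.mod (PySem.Int.floordiv a d) c := by
  obtain ⟨t, ht⟩ := hdvd
  rw [PySem.Int.mod_eq_emod_of_pos hF, PySem.Int.floordiv_eq_ediv_of_pos hd,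
      PySem.Int.floordiv_eq_ediv_of_pos hd, PySem.Int.mod_eq_emod_of_pos hc,
      PySem.Int.mod_eq_emod_of_pos hc]
  rw [Int.emod_def a F, ht]
  have h1 : a - d*c*t*(a/(d*c*t)) = a - (c*(t*(a/(d*c*t))))*d := by ring
  rw [h1, pvSubMulDiv _ _ _ (by omega)]
  have h2 : a/d - c*(t*(a/(d*c*t))) = a/d + (-(t*(a/(d*c*t))))*c := by ring
  rw [h2]
  simp only [Int.add_mul_emod_self_right]

theorem pvDigs_mod : ∀ (m : Nat) (a F : Int), 0 < F → pvFactI (m-1) ∣ F →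
    pvDigs (PySem.Int.mod a F) m = pvDigs a m
  | 0, _, _, _, _ => rfl
  | 1, _, _, _, _ => rfl
  | 2, _, _, _, _ => rfl
  | k+3, a, F, hF, hdvd => by
    have hdvd' : pvFactI (k+2) ∣ F := by
      have : k+3-1 = k+2 := by omega
      rwa [this] at hdvd
    have hd1 : pvFactI (k+1) ∣ F := by
      refine dvd_trans ?_ hdvd'
      simp only [pvFactI]
      exact_mod_cast Nat.factorial_dvd_factorial (by omega)
    rw [pvDigs, pvDigs, pvDigs_mod (k+2) a F hF (by simpa using hd1),
        pvModDivMod a F (pvFactI (k+1)) ((k+2 : Nat) : Int) hF (pvFactI_pos _) (by positivity)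
          (by rw [pvFactI_succ (k+1)]; exact hdvd')]

-- B's fold over range(2, m) computes (num // (m-1)!, the digit list)
theorem pvFoldB (m : Nat) (hm : 2 ≤ m) (a : Int) (l : List Int) :
    (PySem.List.pyRange 2 (m:Int) 1).foldl pvStep (a, l)
      = (PySem.Int.floordiv a (pvFactI (m-1)), l ++ pvDigs a m) := by
  induction m, hm using Nat.le_induction with
  | base =>
    rw [PySem.List.pyRange_one_eq_nil (by norm_num)]
    show (a, l) = _
    rw [show (2-1 : Nat) = 1 from rfl, show pvFactI 1 = 1 from rfl, pvFloordiv_one,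
        show pvDigs a 2 = [] from rfl, List.append_nil]
  | succ m hm ih =>
    obtain ⟨k, rfl⟩ : ∃ k, m = k + 2 := ⟨m - 2, by omega⟩
    have hcast : ((k+2+1 : Nat) : Int) = ((k+2 : Nat) : Int) + 1 := by push_cast; ring
    rw [hcast, PySem.List.pyRange_one_succ_right (by exact_mod_cast hm), List.foldl_append, ih]
    simp only [List.foldl_cons, List.foldl_nil, pvStep]
    have e1 : k+2-1 = k+1 := by omega
    have e2 : k+2+1 = k+3 := by omega
    have e3 : k+3-1 = k+2 := by omega
    rw [e1, e2, e3, pvDigs]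
    refine Prod.ext ?_ ?_
    · show PySem.Int.floordiv (PySem.Int.floordiv a (pvFactI (k+1))) ((k+2 : Nat) : Int)
        = PySem.Int.floordiv a (pvFactI (k+2))
      rw [PySem.Int.floordiv_eq_ediv_of_pos (pvFactI_pos _),
          PySem.Int.floordiv_eq_ediv_of_pos (by positivity),
          PySem.Int.floordiv_eq_ediv_of_pos (pvFactI_pos _),
          Int.ediv_ediv_of_nonneg (le_of_lt (pvFactI_pos _)), pvFactI_succ (k+1)]
    · show (l ++ pvDigs a (k+2)) ++ [PySem.Int.mod (PySem.Int.floordiv a (pvFactI (k+1))) ((k+2 : Nat) : Int)] = _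
      rw [List.append_assoc]

-- num % 2 is idempotent under % 2
theorem pvModMod (a : Int) : PySem.Int.mod (PySem.Int.mod a 2) 2 = PySem.Int.mod a 2 := by
  rw [PySem.Int.mod_eq_emod_of_pos (by norm_num), PySem.Int.mod_eq_emod_of_pos (by norm_num),
      Int.emod_emod_of_dvd _ dvd_rfl]

-- accumulator comes out of A's loop
theorem pvFacLoop_acc : ∀ (k : Nat) (n : Int), n.toNat = k → ∀ (acc : String) (num : Int),
    pvFacLoop acc num n = acc ++ pvFacLoop "" num n := by
  intro k
  induction k using Nat.strong_induction_on with
  | _ k ih =>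
    intro n hk acc num
    conv_lhs => rw [pvFacLoop]
    conv_rhs => rw [pvFacLoop]
    by_cases h : n - 1 > 1
    · rw [if_pos h, if_pos h,
          ih (n-1).toNat (by omega) (n-1) rfl,
          ih (n-1).toNat (by omega) (n-1) rfl ("" ++ _)]
      rw [String.empty_append, String.append_assoc]
    · rw [if_neg h, if_neg h, String.empty_append, String.append_assoc]

-- the heart: A's loop equals B's closed shape, for every n ≥ 3
theorem pvAB (m : Nat) (hm : 3 ≤ m) (a : Int) :
    pvFacLoop "" a (m:Int)
      = PySem.Int.toStr (PySem.Int.floordiv a (pvFactI (m-1)))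
        ++ (PySem.Str.join "" ((pvDigs a m).reverse.map PySem.Int.toStr) ++ "0") := by
  induction m, hm using Nat.le_induction generalizing a with
  | base =>
    have h30 : ((3:Nat) : Int) = 3 := by norm_num
    rw [h30, pvFacLoop, if_pos (by norm_num), pvFacLoop, if_neg (by norm_num)]
    have h1 : ((3:Int) - 1).toNat = 2 := by omega
    have h2 : pvFactI 2 = 2 := rfl
    have h3 : pvDigs a 3 = [PySem.Int.mod a 2] := by
      show pvDigs a (0+3) = _
      rw [pvDigs, show pvDigs a (0+2) = [] from rfl, show pvFactI (0+1) = 1 from rfl,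
          pvFloordiv_one, List.nil_append]
      norm_num
    rw [h1, h2, h3, pvModMod]
    simp only [List.reverse_cons, List.reverse_nil, List.nil_append, List.map_cons, List.map_nil]
    rw [pvJoinCons, show PySem.Str.join "" ([] : List String) = "" from rfl,
        String.empty_append, String.append_empty,
        String.append_assoc]
  | succ m hm ih =>
    have hcast : ((m+1 : Nat) : Int) = (m:Int) + 1 := by push_cast; ring
    rw [hcast, pvFacLoop, if_pos (by omega)]
    have htn : (((m:Int)+1) - 1).toNat = m := by omega
    have hn1 : ((m:Int)+1)-1 = (m:Int) := by ring
    rw [htn, hn1, pvFacLoop_acc ((m:Int)).toNat (m:Int) rfl, String.empty_append, ih]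
    have hFpos : 0 < pvFactI m := pvFactI_pos m
    obtain ⟨k, rfl⟩ : ∃ k, m = k + 3 := ⟨m - 3, by omega⟩
    have e2 : k+3-1 = k+2 := by omega
    have e3 : k+3+1-1 = k+3 := by omega
    have e4 : k+3+1 = k+1+3 := by omega
    have e5 : k+1+2 = k+3 := by omega
    have e6 : k+1+1 = k+2 := by omega
    have hE1 : PySem.Int.floordiv (PySem.Int.mod a (pvFactI (k+3))) (pvFactI (k+2))
        = PySem.Int.mod (PySem.Int.floordiv a (pvFactI (k+2))) ((k+3 : Nat) : Int) := by
      rw [← pvFactI_succ (k+2)]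
      exact pvDivModEq a _ _ (pvFactI_pos _) (by positivity)
    have hE2 : pvDigs (PySem.Int.mod a (pvFactI (k+3))) (k+3) = pvDigs a (k+3) := by
      refine pvDigs_mod (k+3) a _ hFpos ?_
      rw [e2]
      simp only [pvFactI]
      exact_mod_cast Nat.factorial_dvd_factorial (by omega)
    have hdig : pvDigs a (k+3+1) = pvDigs a (k+3)
        ++ [PySem.Int.mod (PySem.Int.floordiv a (pvFactI (k+2))) ((k+3 : Nat) : Int)] := by
      rw [e4, pvDigs, e5, e6]
    rw [e2, e3, hE1, hE2, hdig]
    simp only [List.reverse_append, List.reverse_cons, List.reverse_nil, List.nil_append,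
      List.map_cons, List.singleton_append]
    rw [pvJoinCons, String.append_assoc]

-- ===== VERDICT (by name: the statement is the Claim_ definition above) =====
theorem decimalToFactoradic_spec : Claim_equal_decimalToFactoradic := by
  intro num n _
  show decimalToFactoradic num n = decimalToFactoradic_alt num n
  unfold decimalToFactoradic decimalToFactoradic_alt
  by_cases hn : n ≤ 2
  · rw [if_pos hn, pvFacLoop, if_neg (by omega), String.empty_append]
  · rw [if_neg hn]
    obtain ⟨m, rfl⟩ : ∃ m : Nat, (m:Int) = n := ⟨n.toNat, by omega⟩
    have hm : 3 ≤ m := by omega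
    rw [pvAB m hm num]
    show _ = (fun st : Int × List Int =>
        PySem.Int.toStr st.1 ++ PySem.Str.join "" (st.2.reverse.map PySem.Int.toStr) ++ "0")
      ((PySem.List.pyRange 2 (m:Int) 1).foldl pvStep (num, []))
    rw [pvFoldB m (by omega) num []]
    simp only [List.nil_append]
    rw [String.append_assoc]
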